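-- pv_equiv track=rewrite | github.com/ajh123/simple_smsc | src/protocol/gsm/gsm7.py | bits_to_septets
-- ===== SOURCE A (Python) =====
-- from typing import Iterable, List
--
-- def bits_to_septets(bits: List[int]) -> List[int]:
--     """Convert a bit stream back into septet values."""
--
--     septets: List[int] = []
--     for i in range(0, len(bits), 7):
--         value = 0
--         segment = bits[i : i + 7]
--         for idx, bit in enumerate(segment):
--             value |= (bit & 0x01) << idx
--         septets.append(value)
--     return septets
-- ===== SOURCE B (Python) =====
-- from typing import List
--
--
-- def bits_to_septets(bits: List[int]) -> List[int]:
--     """Convert a bit stream back into septet values (single flat pass)."""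
--
--     septets: List[int] = []
--     value = 0
--     for idx, bit in enumerate(bits):
--         if idx % 7 == 0 and idx > 0:
--             septets.append(value)
--             value = 0
--         value |= (bit & 0x01) << (idx % 7)
--     if bits:
--         septets.append(value)
--     return septets
-- ===== Notes on version B (the rewrite author's own statement) =====
-- stated objective: alternative
-- what changed: B replaces A's chunk-and-reduce structure (outer loop over 7-step range, slicing a segment, inner enumerate loop per chunk) with one flat pass over enumerate(bits) that keeps a running value, flushes it when the index hits a multiple of 7, and appends the final value once at the end.
import Mathlib
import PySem

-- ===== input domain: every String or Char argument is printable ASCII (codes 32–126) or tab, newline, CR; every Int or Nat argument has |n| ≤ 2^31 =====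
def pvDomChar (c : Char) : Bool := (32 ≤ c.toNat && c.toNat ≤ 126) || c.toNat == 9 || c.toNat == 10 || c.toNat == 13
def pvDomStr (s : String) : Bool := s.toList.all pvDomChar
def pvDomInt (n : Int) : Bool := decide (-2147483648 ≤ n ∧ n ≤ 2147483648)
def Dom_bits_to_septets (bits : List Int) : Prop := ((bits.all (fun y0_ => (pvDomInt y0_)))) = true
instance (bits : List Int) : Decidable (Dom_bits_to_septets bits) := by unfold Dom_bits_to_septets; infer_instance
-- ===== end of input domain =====

-- B groups the bit stream with ONE flat enumerate loop (running value, mod-7 flush) instead of A's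
-- outer 7-step range loop slicing a segment and reducing it with an inner loop (objective: alternative).

-- ===== PORT A =====
-- inner loop of A: `for idx, bit in enumerate(segment): value |= (bit & 0x01) << idx`
-- (enumerate indices are ≥ 0, so `.toNat` on the index is exact)
def pvInnerStep (value : Int) (ib : Int × Int) : Int :=
  PySem.Int.bor value ((PySem.Int.band ib.2 1) <<< ib.1.toNat)

def pvSegVal (segment : List Int) : Int :=
  (PySem.List.enumerate segment).foldl pvInnerStep 0

def bits_to_septets (bits : List Int) : List Int :=
  (PySem.List.pyRange 0 (bits.length : Int) 7).foldl
    (fun septets i =>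
      septets ++ [pvSegVal (PySem.List.slice bits (some i) (some (i + 7)))]) []

-- ===== PORT B =====
-- loop body of B: flush on `idx % 7 == 0 and idx > 0`, then `value |= (bit & 0x01) << (idx % 7)`
-- (enumerate indices are ≥ 0, so `idx % 7` is ≥ 0 and `.toNat` is exact)
def pvBStep (st : List Int × Int) (ib : Int × Int) : List Int × Int :=
  let st := if PySem.Int.mod ib.1 7 == 0 && decide (0 < ib.1) then (st.1 ++ [st.2], (0 : Int)) else st
  (st.1, PySem.Int.bor st.2 ((PySem.Int.band ib.2 1) <<< (PySem.Int.mod ib.1 7).toNat))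

def bits_to_septets_alt (bits : List Int) : List Int :=
  let st := (PySem.List.enumerate bits).foldl pvBStep ([], 0)
  if bits.isEmpty then st.1 else st.1 ++ [st.2]

-- ===== PRECONDITION & SPEC =====
def Spec_bits_to_septets (bits : List Int) (out : List Int) : Prop := out = bits_to_septets_alt bits
instance (bits : List Int) (out : List Int) : Decidable (Spec_bits_to_septets bits out) := by unfold Spec_bits_to_septets; infer_instance

-- ===== CLAIM (what is proved, stated in full; the proofs are below) =====
def Claim_equal_bits_to_septets : Prop := ∀ (bits : List Int), Dom_bits_to_septets bits → Spec_bits_to_septets bits (bits_to_septets bits)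

-- ===== LEMMAS AND PROOFS =====

def pvCore (l : List Int) : List Int × Int :=
  (PySem.List.enumerate l).foldl pvBStep ([], 0)

theorem pvEnumCons {α : Type} (x : α) (l : List α) (k : Int) :
    PySem.List.enumerate (x :: l) k = (k, x) :: PySem.List.enumerate l (k + 1) := by
  simp [PySem.List.enumerate]

theorem pvEnumAppend {α : Type} (l₁ l₂ : List α) (k : Int) :
    PySem.List.enumerate (l₁ ++ l₂) k
      = PySem.List.enumerate l₁ k ++ PySem.List.enumerate l₂ (k + l₁.length) := by
  induction l₁ generalizing k with
  | nil => simp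
  | cons x t ih =>
      simp only [List.cons_append, pvEnumCons, ih, List.length_cons]
      rw [show k + 1 + (t.length : Int) = k + ((t.length + 1 : Nat) : Int) by push_cast; ring]

theorem pvAccOut (es : List (Int × Int)) (acc : List Int) (v : Int) :
    es.foldl pvBStep (acc, v)
      = (acc ++ (es.foldl pvBStep ([], v)).1, (es.foldl pvBStep ([], v)).2) := by
  induction es generalizing acc v with
  | nil => simp
  | cons ib t ih =>
      by_cases h : 7 ∣ ib.1 ∧ 0 < ib.1
      · have e1 : pvBStep (acc, v) ib
            = (acc ++ [v], PySem.Int.bor 0 ((PySem.Int.band ib.2 1) <<< (PySem.Int.mod ib.1 7).toNat)) := by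
          simp [pvBStep, h]
        have e2 : pvBStep ([], v) ib
            = ([v], PySem.Int.bor 0 ((PySem.Int.band ib.2 1) <<< (PySem.Int.mod ib.1 7).toNat)) := by
          simp [pvBStep, h]
        rw [List.foldl_cons, List.foldl_cons, e1, e2, ih (acc ++ [v]) _, ih [v] _]
        simp
      · have e1 : pvBStep (acc, v) ib
            = (acc, PySem.Int.bor v ((PySem.Int.band ib.2 1) <<< (PySem.Int.mod ib.1 7).toNat)) := by
          simp [pvBStep, h]
        have e2 : pvBStep ([], v) ib
            = ([], PySem.Int.bor v ((PySem.Int.band ib.2 1) <<< (PySem.Int.mod ib.1 7).toNat)) := by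
          simp [pvBStep, h]
        rw [List.foldl_cons, List.foldl_cons, e1, e2]
        exact ih acc _

theorem pvShiftCongr (l : List Int) (k : Int) (hk0 : 0 ≤ k) (hk : PySem.Int.mod k 7 = 0) :
    ∀ (j : Int) (s : List Int × Int), 1 ≤ j →
      (PySem.List.enumerate l (k + j)).foldl pvBStep s
        = (PySem.List.enumerate l j).foldl pvBStep s := by
  induction l with
  | nil => intro j s hj; simp
  | cons b t ih =>
      intro j s hj
      have hk7 : k % 7 = 0 := by
        rw [← PySem.Int.mod_eq_emod_of_pos (show (0:Int) < 7 by omega)]; exact hk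
      simp only [pvEnumCons, List.foldl_cons]
      have hstep : pvBStep s (k + j, b) = pvBStep s (j, b) := by
        have hm : (k + j) % 7 = j % 7 := by omega
        have hp : (0 < k + j) ↔ (0 < j) := by omega
        simp [pvBStep, hm, hp]
      rw [hstep, show k + j + 1 = k + (j + 1) by ring, ih (j + 1) _ (by omega)]

theorem pvSmall (l : List Int) :
    ∀ (k : Int) (acc : List Int) (v : Int), 1 ≤ k → k + l.length ≤ 7 →
      (PySem.List.enumerate l k).foldl pvBStep (acc, v)
        = (acc, (PySem.List.enumerate l k).foldl pvInnerStep v) := by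
  induction l with
  | nil => intro k acc v _ _; simp
  | cons b t ih =>
      intro k acc v hk hlen
      simp only [List.length_cons] at hlen
      simp only [pvEnumCons, List.foldl_cons]
      have hstep : pvBStep (acc, v) (k, b)
          = (acc, pvInnerStep v (k, b)) := by
        have h2 : k % 7 = k := by omega
        have h3 : ¬(k = 0 ∧ 0 < k) := by omega
        simp [pvBStep, pvInnerStep, h2, h3]
      rw [hstep]
      exact ih (k + 1) acc _ (by omega) (by omega)

theorem pvRestart (l : List Int) (k : Int) (acc : List Int) (v : Int)
    (hk0 : 0 < k) (hk : PySem.Int.mod k 7 = 0) :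
    (PySem.List.enumerate l k).foldl pvBStep (acc, v)
      = match l with
        | [] => (acc, v)
        | _ :: _ => ((acc ++ [v]) ++ (pvCore l).1, (pvCore l).2) := by
  cases l with
  | nil => simp
  | cons b t =>
      have hk7 : k % 7 = 0 := by
        rw [← PySem.Int.mod_eq_emod_of_pos (show (0:Int) < 7 by omega)]; exact hk
      have hstep : pvBStep (acc, v) (k, b)
          = (acc ++ [v], PySem.Int.bor 0 (PySem.Int.band b 1)) := by
        have hc : 7 ∣ k ∧ 0 < k := ⟨by omega, hk0⟩
        simp [pvBStep, hc, hk7]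
      have hstep0 : pvBStep ([], 0) (0, b)
          = ([], PySem.Int.bor 0 (PySem.Int.band b 1)) := by
        simp [pvBStep]
      simp only [pvEnumCons, List.foldl_cons, hstep]
      rw [pvShiftCongr t k (by omega) hk 1 _ (by omega)]
      rw [pvAccOut]
      simp only [pvCore, pvEnumCons, List.foldl_cons, hstep0]
      simp

theorem pvBStepLemma (bits : List Int) (h : bits ≠ []) :
    bits_to_septets_alt bits
      = pvSegVal (bits.take 7) :: bits_to_septets_alt (bits.drop 7) := by
  obtain ⟨b, l, rfl⟩ := List.exists_cons_of_ne_nil h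
  set w : Int := PySem.Int.bor 0 (PySem.Int.band b 1) with hwdef
  have hw : pvBStep ([], 0) (0, b) = ([], w) := by
    simp [pvBStep, hwdef]
  have hsplit : l = l.take 6 ++ l.drop 6 := (List.take_append_drop 6 l).symm
  have henumc : PySem.List.enumerate (b :: l) = (0, b) :: PySem.List.enumerate l 1 := by
    rw [pvEnumCons]; norm_num
  have hcore : (PySem.List.enumerate (b :: l)).foldl pvBStep ([], 0)
      = (PySem.List.enumerate l 1).foldl pvBStep ([], w) := by
    rw [henumc, List.foldl_cons, hw]
  have henumc6 : PySem.List.enumerate (b :: l.take 6) = (0, b) :: PySem.List.enumerate (l.take 6) 1 := by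
    rw [pvEnumCons]; norm_num
  have hseg : pvSegVal ((b :: l).take 7)
      = (PySem.List.enumerate (l.take 6) 1).foldl pvInnerStep w := by
    rw [List.take_succ_cons, pvSegVal, henumc6, List.foldl_cons]
    congr 1
    simp [pvInnerStep, hwdef]
  have haltnil : bits_to_septets_alt ([] : List Int) = [] := by rfl
  have hAltEq : ∀ (xs : List Int), xs.isEmpty = false →
      bits_to_septets_alt xs = (pvCore xs).1 ++ [(pvCore xs).2] := by
    intro xs hxs
    simp [bits_to_septets_alt, pvCore, hxs]
  by_cases hd : l.drop 6 = []
  · -- short tail: everything fits in the first septet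
    have hlen : l.length ≤ 6 := by
      have := List.drop_eq_nil_iff.mp hd; omega
    have htake : l.take 6 = l := List.take_of_length_le hlen
    have hsm : (PySem.List.enumerate l 1).foldl pvBStep (([] : List Int), w)
        = ([], (PySem.List.enumerate l 1).foldl pvInnerStep w) :=
      pvSmall l 1 [] w (by omega) (by omega)
    have hcoreval : pvCore (b :: l)
        = ([], (PySem.List.enumerate l 1).foldl pvInnerStep w) := by
      rw [pvCore, hcore, hsm]
    rw [hAltEq (b :: l) rfl, hcoreval]
    rw [htake] at hseg
    simp only [List.nil_append, List.drop_succ_cons, hd, haltnil]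
    rw [hseg]
  · -- long tail: a flush happens at index 7 and the rest restarts
    have hlen6 : 6 < l.length := by
      by_contra hle
      exact hd (List.drop_eq_nil_iff.mpr (by omega))
    have hlt : (l.take 6).length = 6 := by
      simp only [List.length_take]
      omega
    have henum : PySem.List.enumerate l 1
        = PySem.List.enumerate (l.take 6) 1 ++ PySem.List.enumerate (l.drop 6) 7 := by
      conv_lhs => rw [hsplit]
      rw [pvEnumAppend, hlt]
      norm_num
    have hfirst : (PySem.List.enumerate (l.take 6) 1).foldl pvBStep (([] : List Int), w)
        = ([], (PySem.List.enumerate (l.take 6) 1).foldl pvInnerStep w) :=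
      pvSmall (l.take 6) 1 [] w (by omega) (by rw [hlt]; norm_num)
    have hne : (l.drop 6).isEmpty = false := by
      cases hdd : l.drop 6 with
      | nil => exact absurd hdd hd
      | cons c r => rfl
    have hrest := pvRestart (l.drop 6) 7 ([] : List Int)
      ((PySem.List.enumerate (l.take 6) 1).foldl pvInnerStep w) (by omega) (by decide)
    obtain ⟨c, r, hcr⟩ := List.exists_cons_of_ne_nil hd
    rw [hcr] at hrest
    rw [← hcr] at hrest
    have hcoreval : pvCore (b :: l)
        = ([(PySem.List.enumerate (l.take 6) 1).foldl pvInnerStep w] ++ (pvCore (l.drop 6)).1,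
           (pvCore (l.drop 6)).2) := by
      rw [pvCore, hcore, henum, List.foldl_append, hfirst, hrest, hcr]
      simp
    rw [hAltEq (b :: l) rfl, hcoreval]
    simp only [List.drop_succ_cons]
    rw [hAltEq (l.drop 6) hne, hseg]
    simp

-- A in closed map form over chunk indices
theorem pvAMap (bits : List Int) :
    bits_to_septets bits
      = (List.range ((bits.length + 6) / 7)).map
          (fun k => pvSegVal ((bits.drop (7 * k)).take 7)) := by
  rw [bits_to_septets, PySem.List.pyRange_of_pos 0 (bits.length : Int) (by omega)]
  rw [List.foldl_map, PySem.List.foldl_append_singleton_eq_map]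
  simp only [List.nil_append]
  have hm : (if (0 : Int) < (bits.length : Int)
      then (((bits.length : Int) - 0 + 7 - 1) / 7).toNat else 0) = (bits.length + 6) / 7 := by
    split_ifs with h
    · omega
    · omega
  rw [hm]
  apply List.map_congr_left
  intro k hk
  congr 1
  have h1 : (0 : Int) + 7 * (k : Int) = ((7 * k : Nat) : Int) := by push_cast; ring
  rw [h1, ← PySem.List.slice_natCast_add bits (7 * k) 7]
  norm_num

theorem pvAStepLemma (bits : List Int) (h : bits ≠ []) :
    bits_to_septets bits
      = pvSegVal (bits.take 7) :: bits_to_septets (bits.drop 7) := by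
  rw [pvAMap, pvAMap]
  have hn : 1 ≤ bits.length := List.length_pos_of_ne_nil h
  have hm : (bits.length + 6) / 7 = ((bits.drop 7).length + 6) / 7 + 1 := by
    rw [List.length_drop]; omega
  rw [hm, List.range_succ_eq_map, List.map_cons, List.map_map]
  refine congrArg₂ List.cons (by simp) ?_
  apply List.map_congr_left
  intro a ha
  simp only [Function.comp_apply, List.drop_drop]
  rw [show 7 * (a + 1) = 7 + 7 * a from by ring]

theorem pvAB (bits : List Int) : bits_to_septets bits = bits_to_septets_alt bits := by
  by_cases h : bits = []
  · subst h
    simp [bits_to_septets, bits_to_septets_alt, PySem.List.pyRange, PySem.List.enumerate]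
  · rw [pvAStepLemma bits h, pvBStepLemma bits h, pvAB (bits.drop 7)]
termination_by bits.length
decreasing_by
  have : bits.length ≠ 0 := fun hz => h (List.eq_nil_of_length_eq_zero hz)
  simp [List.length_drop]; omega

-- ===== VERDICT (by name: the statement is the Claim_ definition above) =====
theorem bits_to_septets_spec : Claim_equal_bits_to_septets := by
  intro bits _
  show bits_to_septets bits = bits_to_septets_alt bits
  exact pvAB bits
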